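-- pv_equiv track=rewrite | github.com/SeungminKimdev/study-code | 백준/Silver/18111. 마인크래프트/마인크래프트.py | checkSec
-- ===== SOURCE A (Python) =====
-- def checkSec(high, land):
--     sumSec = 0
--     tStore = 0
--     for i in land:
--         num = i-high
--         if num < 0:
--             sumSec -= num
--             tStore += num
--         else:
--             sumSec += 2 * num
--             tStore += num
--     return sumSec, tStore
-- ===== SOURCE B (Python) =====
-- def checkSec(high, land):
--     # Partition the terrain at the target height, then combine two global
--     # physical quantities: blocks 'removed' above the target and blocks
--     # 'added' below it.  Removing takes 2s/block, adding takes 1s/block,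
--     # and the inventory delta is removed - added.
--     below = [i for i in land if i < high]
--     above = [i for i in land if i >= high]
--     removed = sum(above) - high * len(above)
--     added = high * len(below) - sum(below)
--     return 2 * removed + added, removed - added
-- ===== Notes on version B (the rewrite author's own statement) =====
-- stated objective: alternative
-- what changed: Replaces A's single branchy loop accumulating two counters per element with a partition of the terrain at the target height followed by closed-form aggregates (blocks removed above, blocks added below) from which both outputs are combined.
import Mathlib
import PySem

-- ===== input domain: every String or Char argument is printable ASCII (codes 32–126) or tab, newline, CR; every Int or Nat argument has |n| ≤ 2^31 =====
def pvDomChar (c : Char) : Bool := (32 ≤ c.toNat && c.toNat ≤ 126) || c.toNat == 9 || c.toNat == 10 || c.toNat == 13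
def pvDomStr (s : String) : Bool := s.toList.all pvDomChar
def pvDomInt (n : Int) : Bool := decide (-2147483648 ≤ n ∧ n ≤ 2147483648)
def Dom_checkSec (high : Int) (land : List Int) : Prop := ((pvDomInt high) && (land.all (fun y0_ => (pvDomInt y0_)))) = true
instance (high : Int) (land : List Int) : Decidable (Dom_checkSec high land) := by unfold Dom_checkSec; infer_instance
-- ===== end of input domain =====

-- B partitions the terrain at the target height and combines closed-form aggregates
-- (blocks removed above, blocks added below) instead of A's branchy two-accumulator loop;
-- objective: alternative decomposition, same O(n) cost.

-- ===== PORT A =====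
def checkSec (high : Int) (land : List Int) : Int × Int :=
  let st := land.foldl (fun (acc : Int × Int) i =>
    let num := i - high
    if num < 0 then (acc.1 - num, acc.2 + num)
    else (acc.1 + 2 * num, acc.2 + num)) (0, 0)
  (st.1, st.2)

-- ===== PORT B =====
def checkSec_alt (high : Int) (land : List Int) : Int × Int :=
  let below := land.filter (fun i => i < high)
  let above := land.filter (fun i => i ≥ high)
  let removed := above.sum - high * above.length
  let added := high * below.length - below.sum
  (2 * removed + added, removed - added)

-- ===== PRECONDITION & SPEC =====
def Spec_checkSec (high : Int) (land : List Int) (out : Int × Int) : Prop := out = checkSec_alt high land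
instance (high : Int) (land : List Int) (out : Int × Int) : Decidable (Spec_checkSec high land out) := by unfold Spec_checkSec; infer_instance

-- ===== CLAIM (what is proved, stated in full; the proofs are below) =====
def Claim_equal_checkSec : Prop := ∀ (high : Int) (land : List Int), Dom_checkSec high land → Spec_checkSec high land (checkSec high land)

-- ===== LEMMAS AND PROOFS =====
lemma checkSec_loop (high : Int) (land : List Int) (a b : Int) :
    land.foldl (fun (acc : Int × Int) i =>
      let num := i - high
      if num < 0 then (acc.1 - num, acc.2 + num)
      else (acc.1 + 2 * num, acc.2 + num)) (a, b)
    = (a + 2 * ((land.filter (fun i => i ≥ high)).sum - high * (land.filter (fun i => i ≥ high)).length)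
         + (high * (land.filter (fun i => i < high)).length - (land.filter (fun i => i < high)).sum),
       b + ((land.filter (fun i => i ≥ high)).sum - high * (land.filter (fun i => i ≥ high)).length)
         - (high * (land.filter (fun i => i < high)).length - (land.filter (fun i => i < high)).sum)) := by
  induction land generalizing a b with
  | nil => simp
  | cons x xs ih =>
      simp only [List.foldl_cons, List.filter_cons]
      by_cases h : x - high < 0
      · have h1 : decide (x < high) = true := by simp; omega
        have h2 : decide (x ≥ high) = false := by simp; omega
        rw [if_pos h]
        simp only [h1, h2, if_pos, if_neg, Bool.false_eq_true, ite_true, ite_false]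
        rw [ih]
        simp only [List.sum_cons, List.length_cons, Prod.mk.injEq]
        constructor <;> push_cast <;> ring
      · have h1 : decide (x < high) = false := by simp; omega
        have h2 : decide (x ≥ high) = true := by simp; omega
        rw [if_neg h]
        simp only [h1, h2, Bool.false_eq_true, ite_true, ite_false]
        rw [ih]
        simp only [List.sum_cons, List.length_cons, Prod.mk.injEq]
        constructor <;> push_cast <;> ring

-- ===== VERDICT (by name: the statement is the Claim_ definition above) =====
theorem checkSec_spec : Claim_equal_checkSec := by
  intro high land _
  unfold Spec_checkSec checkSec checkSec_alt
  rw [checkSec_loop]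
  simp only [zero_add]
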